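-- pv_equiv track=rewrite | github.com/CutePufik/TK | Alexander/indiv2.py | poly_sub
-- ===== SOURCE A (Python) =====
-- def poly_sub(p1, p2, q):
--     l = max(len(p1), len(p2))
--     res = [0] * l
--     for i in range(l):
--         c1 = p1[i] if i < len(p1) else 0
--         c2 = p2[i] if i < len(p2) else 0
--         res[i] = (c1 - c2) % q
--     return res
-- ===== SOURCE B (Python) =====
-- def poly_sub(p1, p2, q):
--     head = [(a - b) % q for a, b in zip(p1, p2)]
--     if len(p1) >= len(p2):
--         tail = [c % q for c in p1[len(p2):]]
--     else:
--         tail = [(-c) % q for c in p2[len(p1):]]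
--     return head + tail
-- ===== Notes on version B (the rewrite author's own statement) =====
-- stated objective: simpler
-- what changed: Replaces the bounds-checked indexed loop that writes into a preallocated zero list with two shaped passes: a zip/map over the common prefix and a signed map over the longer list's tail, concatenated.
import Mathlib
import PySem

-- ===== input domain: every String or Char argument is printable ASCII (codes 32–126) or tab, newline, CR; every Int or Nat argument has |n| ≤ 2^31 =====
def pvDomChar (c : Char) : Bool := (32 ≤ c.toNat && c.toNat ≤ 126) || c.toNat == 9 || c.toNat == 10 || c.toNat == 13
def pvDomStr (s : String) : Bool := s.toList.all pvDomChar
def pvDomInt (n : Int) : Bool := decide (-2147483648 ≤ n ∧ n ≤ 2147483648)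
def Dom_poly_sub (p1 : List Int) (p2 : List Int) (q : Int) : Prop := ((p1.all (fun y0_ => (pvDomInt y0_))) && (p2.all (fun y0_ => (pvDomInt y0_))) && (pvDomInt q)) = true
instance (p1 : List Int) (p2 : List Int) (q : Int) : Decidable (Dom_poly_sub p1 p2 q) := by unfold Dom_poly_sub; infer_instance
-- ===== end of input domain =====

-- B replaces A's bounds-checked indexed writes into a preallocated list by a zip over the
-- common prefix plus a signed map over the longer list's tail (objective: simpler).

-- ===== PORT A =====
def poly_sub (p1 : List Int) (p2 : List Int) (q : Int) : List Int :=
  let l : Nat := max p1.length p2.length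
  let res : List Int := List.replicate l 0
  (List.range l).foldl (fun res i =>
    let c1 : Int := if i < p1.length then p1.getD i 0 else 0
    let c2 : Int := if i < p2.length then p2.getD i 0 else 0
    res.set i (PySem.Int.mod (c1 - c2) q)) res

-- ===== PORT B =====
def poly_sub_alt (p1 : List Int) (p2 : List Int) (q : Int) : List Int :=
  let head := (p1.zip p2).map (fun ab => PySem.Int.mod (ab.1 - ab.2) q)
  let tail := if p1.length ≥ p2.length
    then (p1.drop p2.length).map (fun c => PySem.Int.mod c q)
    else (p2.drop p1.length).map (fun c => PySem.Int.mod (-c) q)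
  head ++ tail

-- ===== PRECONDITION & SPEC =====
-- Pre_ excludes exactly the inputs on which Python A raises ZeroDivisionError:
-- q = 0 with at least one nonempty polynomial (with both lists empty A returns []).
def Pre_poly_sub (p1 : List Int) (p2 : List Int) (q : Int) : Prop :=
  q ≠ 0 ∨ (p1 = [] ∧ p2 = [])
instance (p1 : List Int) (p2 : List Int) (q : Int) : Decidable (Pre_poly_sub p1 p2 q) := by unfold Pre_poly_sub; infer_instance
def pvWitness_poly_sub : List Int × List Int × Int := ([5, 3], [1, 2, 7], 4)

def Spec_poly_sub (p1 : List Int) (p2 : List Int) (q : Int) (out : List Int) : Prop := out = poly_sub_alt p1 p2 q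
instance (p1 : List Int) (p2 : List Int) (q : Int) (out : List Int) : Decidable (Spec_poly_sub p1 p2 q out) := by unfold Spec_poly_sub; infer_instance

-- ===== CLAIM (what is proved, stated in full; the proofs are below) =====
def Claim_equal_poly_sub : Prop := ∀ (p1 : List Int) (p2 : List Int) (q : Int), Dom_poly_sub p1 p2 q → Pre_poly_sub p1 p2 q → Spec_poly_sub p1 p2 q (poly_sub p1 p2 q)

-- ===== LEMMAS AND PROOFS =====

theorem take_succ_set (res : List Int) (k : Nat) (v : Int) (h : k < res.length) :
    (res.set k v).take (k+1) = res.take k ++ [v] := by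
  rw [List.set_eq_take_append_cons_drop, if_pos h, List.take_append]
  simp [List.take_take, List.length_take, Nat.min_eq_left h.le]

-- A's indexed-write loop over range' k n, started from a list of length k + n, keeps the
-- first k entries and replaces entry i with f i for k ≤ i < k + n.
theorem foldl_set_range' (f : Nat → Int) :
    ∀ (n k : Nat) (res : List Int), res.length = k + n →
    (List.range' k n).foldl (fun r i => r.set i (f i)) res
      = res.take k ++ (List.range' k n).map f := by
  intro n
  induction n with
  | zero =>
    intro k res h
    simp only [List.range'_zero, List.foldl_nil, List.map_nil, List.append_nil]
    exact (List.take_of_length_le (by omega)).symm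
  | succ n ih =>
    intro k res h
    rw [List.range'_succ]
    simp only [List.foldl_cons, List.map_cons]
    rw [ih (k + 1) (res.set k (f k)) (by simp [h]; omega)]
    rw [take_succ_set res k (f k) (by omega)]
    simp

theorem map_range_getD (xs : List Int) (g : Int → Int) :
    (List.range xs.length).map (fun i => g (xs.getD i 0)) = xs.map g := by
  induction xs with
  | nil => simp
  | cons x t ih =>
    rw [List.length_cons, List.range_succ_eq_map]
    simp only [List.map_cons, List.map_map]
    simp only [Function.comp_def, List.getD_cons_zero, List.getD_cons_succ]
    rw [ih]

-- A's per-index value, evaluated over range (max |p1| |p2|), is exactly B's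
-- zip-prefix followed by the signed tail.
theorem map_range_eq_alt (q : Int) :
    ∀ (p1 p2 : List Int),
    (List.range (max p1.length p2.length)).map (fun i =>
        PySem.Int.mod ((if i < p1.length then p1.getD i 0 else 0)
                     - (if i < p2.length then p2.getD i 0 else 0)) q)
      = poly_sub_alt p1 p2 q := by
  intro p1
  induction p1 with
  | nil =>
    intro p2
    cases p2 with
    | nil => simp [poly_sub_alt]
    | cons b bs =>
      have hcongr : (List.range (max ([]:List Int).length (b :: bs).length)).map (fun i =>
          PySem.Int.mod ((if i < ([]:List Int).length then ([]:List Int).getD i 0 else 0)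
                       - (if i < (b :: bs).length then (b :: bs).getD i 0 else 0)) q)
          = (List.range (b :: bs).length).map (fun i => PySem.Int.mod (-((b :: bs).getD i 0)) q) := by
        rw [List.length_nil, Nat.zero_max]
        apply List.map_congr_left
        intro i hi
        rw [List.mem_range] at hi
        rw [if_pos hi, if_neg (by simp), zero_sub]
      rw [hcongr, map_range_getD (b :: bs) (fun c => PySem.Int.mod (-c) q)]
      simp [poly_sub_alt]
  | cons a as ih =>
    intro p2
    cases p2 with
    | nil =>
      have hcongr : (List.range (max (a :: as).length ([]:List Int).length)).map (fun i =>
          PySem.Int.mod ((if i < (a :: as).length then (a :: as).getD i 0 else 0)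
                       - (if i < ([]:List Int).length then ([]:List Int).getD i 0 else 0)) q)
          = (List.range (a :: as).length).map (fun i => PySem.Int.mod ((a :: as).getD i 0) q) := by
        rw [List.length_nil, Nat.max_zero]
        apply List.map_congr_left
        intro i hi
        rw [List.mem_range] at hi
        rw [if_pos hi, if_neg (by simp), sub_zero]
      rw [hcongr, map_range_getD (a :: as) (fun c => PySem.Int.mod c q)]
      simp [poly_sub_alt]
    | cons b bs =>
      have hmax : max (a :: as).length (b :: bs).length = max as.length bs.length + 1 := by
        simp [Nat.succ_max_succ]
      rw [hmax, List.range_succ_eq_map]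
      simp only [List.map_cons, List.map_map, Function.comp_def]
      have hstep :
          (List.range (max as.length bs.length)).map (fun i =>
            PySem.Int.mod ((if i + 1 < (a :: as).length then (a :: as).getD (i+1) 0 else 0)
                         - (if i + 1 < (b :: bs).length then (b :: bs).getD (i+1) 0 else 0)) q)
          = (List.range (max as.length bs.length)).map (fun i =>
            PySem.Int.mod ((if i < as.length then as.getD i 0 else 0)
                         - (if i < bs.length then bs.getD i 0 else 0)) q) := by
        apply List.map_congr_left
        intro i _
        simp
      rw [hstep, ih bs]
      simp only [poly_sub_alt, List.zip_cons_cons, List.map_cons, List.length_cons,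
        List.drop_succ_cons, Nat.add_le_add_iff_right, ge_iff_le]
      simp

theorem poly_sub_eq_alt (p1 p2 : List Int) (q : Int) :
    poly_sub p1 p2 q = poly_sub_alt p1 p2 q := by
  show (List.range (max p1.length p2.length)).foldl
      (fun r i => r.set i (PySem.Int.mod ((if i < p1.length then p1.getD i 0 else 0)
                                        - (if i < p2.length then p2.getD i 0 else 0)) q))
      (List.replicate (max p1.length p2.length) 0) = poly_sub_alt p1 p2 q
  rw [List.range_eq_range']
  rw [foldl_set_range' _ (max p1.length p2.length) 0 _ (by simp)]
  rw [← List.range_eq_range']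
  simpa using map_range_eq_alt q p1 p2

-- ===== VERDICT (by name: the statement is the Claim_ definition above) =====
theorem poly_sub_spec : Claim_equal_poly_sub := by
  intro p1 p2 q _ _
  exact poly_sub_eq_alt p1 p2 q
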